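-- pv_equiv track=rewrite | github.com/Xelerezex/learning-space | stepik-courses/stepik-python-basis-&-application/2-standart-python-tools/2.1.try-&-except/step-07/main.py | found_path
-- ===== SOURCE A (Python) =====
-- def found_path(exceptions, start, end, path=[]):
--     path = path + [start]
--     if start == end:
--         return path
--     if start not in exceptions:
--         return []
--     for node in exceptions[start]:
--         if node not in path:
--             newpath = found_path(exceptions, node, end, path)
--             if newpath:
--                 return newpath
--     return []
-- ===== SOURCE B (Python) =====
-- def found_path(exceptions, start, end, path=[]):
--     stack = [(start, path + [start])]
--     while stack:
--         node, p = stack.pop()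
--         if node == end:
--             return p
--         for nbr in reversed(exceptions.get(node, [])):
--             if nbr not in p:
--                 stack.append((nbr, p + [nbr]))
--     return []
-- ===== Notes on version B (the rewrite author's own statement) =====
-- stated objective: alternative
-- what changed: Replaces A's recursive backtracking DFS by an explicit-stack iterative DFS: a worklist of (node, path) pairs, children pushed in reverse order so preorder and tie-breaking match exactly.
import Mathlib
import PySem

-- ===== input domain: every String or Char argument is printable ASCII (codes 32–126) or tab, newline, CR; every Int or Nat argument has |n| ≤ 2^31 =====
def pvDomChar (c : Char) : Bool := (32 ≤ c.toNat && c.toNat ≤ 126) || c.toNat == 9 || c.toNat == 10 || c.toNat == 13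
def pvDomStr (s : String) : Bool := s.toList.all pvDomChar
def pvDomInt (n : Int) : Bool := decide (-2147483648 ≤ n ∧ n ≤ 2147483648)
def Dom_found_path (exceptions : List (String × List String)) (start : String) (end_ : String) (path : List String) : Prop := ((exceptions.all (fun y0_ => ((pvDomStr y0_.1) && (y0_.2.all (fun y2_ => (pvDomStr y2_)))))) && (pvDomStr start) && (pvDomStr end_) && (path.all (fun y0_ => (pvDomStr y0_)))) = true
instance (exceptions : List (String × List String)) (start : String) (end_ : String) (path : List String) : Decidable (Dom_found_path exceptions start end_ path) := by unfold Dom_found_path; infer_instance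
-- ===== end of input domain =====

-- B rewrites A's recursive backtracking DFS as an explicit-stack iterative DFS over (node, path)
-- pairs (children pushed in reverse order); return values are proved equal on every input.

-- dict lookup, first match (the association-list convention for Python dict)
def lookupExc : List (String × List String) → String → Option (List String)
  | [], _ => none
  | kv :: rest, k => if kv.1 == k then some kv.2 else lookupExc rest k

-- termination helpers: the universe of neighbour strings and the count of those not yet on the path
def excU (e : List (String × List String)) : List String := e.flatMap (fun kv => kv.2)
def excN (e : List (String × List String)) : Nat := (excU e).length
def pathMu (e : List (String × List String)) (p : List String) : Nat :=
  (excU e).countP (fun s => !p.contains s)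

theorem lookupExc_sub {e : List (String × List String)} {k : String} {v : List String}
    (h : lookupExc e k = some v) : ∀ x ∈ v, x ∈ excU e := by
  intro x hx
  induction e with
  | nil => simp [lookupExc] at h
  | cons kv rest ih =>
    simp only [lookupExc] at h
    simp only [excU, List.flatMap_cons, List.mem_append]
    split at h
    · cases h; exact Or.inl hx
    · exact Or.inr (by simpa [excU] using ih h)

theorem lookupExc_len {e : List (String × List String)} {k : String} {v : List String}
    (h : lookupExc e k = some v) : v.length ≤ excN e := by
  induction e with
  | nil => simp [lookupExc] at h
  | cons kv rest ih =>
    have hstep : excN (kv :: rest) = kv.2.length + excN rest := by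
      simp [excN, excU]
    simp only [lookupExc] at h
    split at h
    · cases h; omega
    · have := ih h; omega

theorem pathMu_lt {e : List (String × List String)} {p : List String} {x : String}
    (hx : x ∈ excU e) (hp : p.contains x = false) : pathMu e (p ++ [x]) < pathMu e p := by
  unfold pathMu
  have hmono : ∀ l : List String,
      l.countP (fun s => !(p ++ [x]).contains s) ≤ l.countP (fun s => !p.contains s) := by
    intro l
    apply List.countP_mono_left
    intro a _ ha
    simp only [Bool.not_eq_true', List.contains_append, Bool.or_eq_false_iff] at ha
    simpa using ha.1
  obtain ⟨s, t, heq⟩ := List.append_of_mem hx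
  rw [heq]
  simp only [List.countP_append, List.countP_cons]
  have h1 : (!(p ++ [x]).contains x) = false := by simp
  have h2 : (!p.contains x) = true := by simpa using hp
  rw [h1, h2, if_neg (by simp : ¬(false = true)), if_pos rfl]
  have := hmono s
  have := hmono t
  omega

-- ===== PORT A =====
mutual
def found_path (exceptions : List (String × List String)) (start : String) (end_ : String) (path : List String) : List String :=
  if start == end_ then path ++ [start]
  else match hm : lookupExc exceptions start with
    | none => []
    | some _ => fpLoop exceptions start end_ (path ++ [start]) 0
termination_by (excN exceptions + 2) * (pathMu exceptions (path ++ [start]) + 1)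
decreasing_by
  · rename_i v
    have hlen : ((lookupExc exceptions start).getD []).length ≤ excN exceptions := by
      simp only [hm, Option.getD_some]
      exact lookupExc_len hm
    have h2 : (excN exceptions + 2) * (pathMu exceptions (path ++ [start]) + 1)
        = (excN exceptions + 2) * pathMu exceptions (path ++ [start]) + (excN exceptions + 2) := by
      ring
    omega

def fpLoop (exceptions : List (String × List String)) (start end_ : String) (path2 : List String) (i : Nat) : List String :=
  if h : i < ((lookupExc exceptions start).getD []).length then
    if path2.contains ((lookupExc exceptions start).getD [])[i] then
      fpLoop exceptions start end_ path2 (i + 1)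
    else
      let newpath := found_path exceptions ((lookupExc exceptions start).getD [])[i] end_ path2
      if newpath ≠ [] then newpath else fpLoop exceptions start end_ path2 (i + 1)
  else []
termination_by (excN exceptions + 2) * pathMu exceptions path2 + (((lookupExc exceptions start).getD []).length - i)
decreasing_by
  · omega
  · rename_i hc
    have hsome : ∃ v, lookupExc exceptions start = some v := by
      cases hv : lookupExc exceptions start with
      | none => simp [hv] at h
      | some v => exact ⟨v, rfl⟩
    obtain ⟨v, hv⟩ := hsome
    have hmem : ((lookupExc exceptions start).getD [])[i] ∈ excU exceptions := by
      apply lookupExc_sub hv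
      simp only [hv, Option.getD_some] at h ⊢
      exact List.getElem_mem h
    have hlt : pathMu exceptions (path2 ++ [((lookupExc exceptions start).getD [])[i]])
        < pathMu exceptions path2 :=
      pathMu_lt hmem (by simpa using hc)
    have hmul : (excN exceptions + 2) * (pathMu exceptions (path2 ++ [((lookupExc exceptions start).getD [])[i]]) + 1)
        ≤ (excN exceptions + 2) * pathMu exceptions path2 :=
      Nat.mul_le_mul_left _ (by omega)
    omega
  · omega
end

-- ===== PORT B =====
-- the body of B's inner for-loop: push one neighbour (with its extended path) if it is not on the path
def pushNbr (p : List String) (st : List (String × List String)) (nbr : String) : List (String × List String) :=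
  if p.contains nbr then st else (nbr, p ++ [nbr]) :: st

-- termination helpers for the stack machine
def entryW (e : List (String × List String)) (pr : String × List String) : Nat :=
  (excN e + 2) ^ (pathMu e pr.2)
def stackM (e : List (String × List String)) (st : List (String × List String)) : Nat :=
  (st.map (entryW e)).sum

theorem stackM_foldl_le (e : List (String × List String)) (p : List String)
    (l : List String) (hsub : ∀ x ∈ l, x ∈ excU e) (acc : List (String × List String)) :
    stackM e (l.foldl (pushNbr p) acc)
      ≤ l.length * (excN e + 2) ^ (pathMu e p - 1) + stackM e acc := by
  induction l generalizing acc with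
  | nil => simp
  | cons x xs ih =>
    simp only [List.foldl_cons]
    have hx := hsub x (by simp)
    have ih' := ih (fun y hy => hsub y (by simp [hy])) (pushNbr p acc x)
    have hsplit : (xs.length + 1) * (excN e + 2) ^ (pathMu e p - 1)
        = xs.length * (excN e + 2) ^ (pathMu e p - 1) + (excN e + 2) ^ (pathMu e p - 1) := by
      ring
    cases hcase : p.contains x with
    | true =>
      have hpush : pushNbr p acc x = acc := by unfold pushNbr; rw [hcase]; simp
      rw [hpush] at ih' ⊢
      simp only [List.length_cons]
      omega
    | false =>
      have hpush : pushNbr p acc x = (x, p ++ [x]) :: acc := by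
        unfold pushNbr; rw [hcase]; simp
      rw [hpush] at ih' ⊢
      have hlt : pathMu e (p ++ [x]) < pathMu e p :=
        pathMu_lt hx hcase
      have hw : entryW e (x, p ++ [x]) ≤ (excN e + 2) ^ (pathMu e p - 1) := by
        show (excN e + 2) ^ (pathMu e (p ++ [x])) ≤ (excN e + 2) ^ (pathMu e p - 1)
        exact Nat.pow_le_pow_right (by omega) (by omega)
      have hst : stackM e ((x, p ++ [x]) :: acc) = entryW e (x, p ++ [x]) + stackM e acc := by
        simp [stackM]
      rw [hst] at ih'
      simp only [List.length_cons]
      omega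

theorem pathMu_zero_all {e : List (String × List String)} {p : List String}
    (h : pathMu e p = 0) : ∀ x ∈ excU e, p.contains x = true := by
  intro x hx
  unfold pathMu at h
  have hall := List.countP_eq_zero.mp h
  have hx' := hall x hx
  simpa using hx'

theorem stackM_push_lt (e : List (String × List String)) (node : String) (p : List String)
    (rest : List (String × List String)) :
    stackM e ((((lookupExc e node).getD []).reverse).foldl (pushNbr p) rest)
      < entryW e (node, p) + stackM e rest := by
  have hsub : ∀ x ∈ ((lookupExc e node).getD []).reverse, x ∈ excU e := by
    intro x hx
    rw [List.mem_reverse] at hx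
    cases hv : lookupExc e node with
    | none => simp [hv] at hx
    | some v => exact lookupExc_sub hv x (by simpa [hv] using hx)
  have hWpos : 0 < entryW e (node, p) := by
    unfold entryW; exact Nat.pow_pos (by omega)
  by_cases hz : pathMu e p = 0
  · have hall : ∀ x ∈ ((lookupExc e node).getD []).reverse, p.contains x = true := fun x hx =>
      pathMu_zero_all hz x (hsub x hx)
    have hid : ∀ (l : List String), (∀ x ∈ l, p.contains x = true) →
        l.foldl (pushNbr p) rest = rest := by
      intro l
      induction l with
      | nil => intro _; rfl
      | cons y ys ih =>
        intro hall'
        have hpush : pushNbr p rest y = rest := by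
          unfold pushNbr; rw [hall' y (by simp)]; simp
        rw [List.foldl_cons, hpush]
        exact ih (fun x hx => hall' x (by simp [hx]))
    rw [hid _ hall]
    omega
  · have hlen : ((lookupExc e node).getD []).reverse.length ≤ excN e := by
      cases hv : lookupExc e node with
      | none => simp [hv]
      | some v => have := lookupExc_len hv; simp [hv]; omega
    have hle := stackM_foldl_le e p ((lookupExc e node).getD []).reverse hsub rest
    have hBpos : 0 < (excN e + 2) ^ (pathMu e p - 1) := Nat.pow_pos (by omega)
    have hB : (excN e + 2) ^ (pathMu e p) = (excN e + 2) ^ (pathMu e p - 1) * (excN e + 2) := by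
      conv_lhs => rw [show pathMu e p = (pathMu e p - 1) + 1 from by omega]
      rw [Nat.pow_succ]
    have hpow : ((lookupExc e node).getD []).reverse.length * (excN e + 2) ^ (pathMu e p - 1)
        < entryW e (node, p) := by
      unfold entryW
      rw [hB]
      nlinarith [hBpos, hlen]
    omega

def fpRun (exceptions : List (String × List String)) (end_ : String)
    (stack : List (String × List String)) : List String :=
  match stack with
  | [] => []
  | (node, p) :: rest =>
    if node == end_ then p
    else fpRun exceptions end_
      ((((lookupExc exceptions node).getD []).reverse).foldl (pushNbr p) rest)
termination_by stackM exceptions stack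
decreasing_by
  have := stackM_push_lt exceptions node p rest
  simp only [stackM, List.map_cons, List.sum_cons] at this ⊢
  omega

def found_path_alt (exceptions : List (String × List String)) (start : String) (end_ : String) (path : List String) : List String :=
  fpRun exceptions end_ [(start, path ++ [start])]

-- ===== PRECONDITION & SPEC =====
def Spec_found_path (exceptions : List (String × List String)) (start : String) (end_ : String) (path : List String) (out : List String) : Prop := out = found_path_alt exceptions start end_ path
instance (exceptions : List (String × List String)) (start : String) (end_ : String) (path : List String) (out : List String) : Decidable (Spec_found_path exceptions start end_ path out) := by unfold Spec_found_path; infer_instance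

-- ===== CLAIM (what is proved, stated in full; the proofs are below) =====
def Claim_equal_found_path : Prop := ∀ (exceptions : List (String × List String)) (start : String) (end_ : String) (path : List String), Dom_found_path exceptions start end_ path → Spec_found_path exceptions start end_ path (found_path exceptions start end_ path)

-- ===== LEMMAS AND PROOFS =====

-- A's body on an already-extended path
def Acore (e : List (String × List String)) (en n : String) (p : List String) : List String :=
  if n == en then p
  else match lookupExc e n with
    | none => []
    | some _ => fpLoop e n en p 0

def listFirst (e : List (String × List String)) (en : String) :
    List (String × List String) → List String
  | [] => []
  | (n, p) :: rest => if Acore e en n p ≠ [] then Acore e en n p else listFirst e en rest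

theorem found_path_eq_Acore (e : List (String × List String)) (s en : String) (path : List String) :
    found_path e s en path = Acore e en s (path ++ [s]) := by
  rw [found_path.eq_def, Acore]
  by_cases hse : (s == en) = true
  · simp [hse]
  · simp only [hse, if_false]
    cases hv : lookupExc e s <;> simp [hv]

theorem push_foldl_eq (p : List String) (l : List String) (acc : List (String × List String)) :
    l.reverse.foldl (pushNbr p) acc
      = (l.filter (fun x => !p.contains x)).map (fun x => (x, p ++ [x])) ++ acc := by
  induction l generalizing acc with
  | nil => simp
  | cons x xs ih =>
    simp only [List.reverse_cons, List.foldl_append, List.foldl_cons, List.foldl_nil,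
      List.filter_cons]
    rw [ih]
    cases hc : p.contains x with
    | true =>
      have hx : x ∈ p := by simpa using hc
      simp [pushNbr, hc, hx]
    | false =>
      have hx : x ∉ p := by simpa using hc
      simp [pushNbr, hc, hx]

theorem loop_first (e : List (String × List String)) (n en : String) (p : List String) :
    ∀ k rest,
      listFirst e en (((((lookupExc e n).getD []).drop k).filter (fun x => !p.contains x)).map
          (fun x => (x, p ++ [x])) ++ rest)
        = if fpLoop e n en p k ≠ [] then fpLoop e n en p k else listFirst e en rest := by
  intro k
  induction hk : ((lookupExc e n).getD []).length - k using Nat.strong_induction_on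
    generalizing k with
  | _ m ih =>
  intro rest
  by_cases hlt : k < ((lookupExc e n).getD []).length
  · rw [List.drop_eq_getElem_cons hlt]
    rw [fpLoop.eq_def]
    simp only [hlt, dif_pos]
    cases hc : p.contains ((lookupExc e n).getD [])[k] with
    | true =>
      simp only [List.filter_cons, hc, Bool.not_true]
      exact ih _ (by omega) (k + 1) rfl rest
    | false =>
      simp only [List.filter_cons, hc, Bool.not_false, if_pos, List.map_cons, List.cons_append]
      rw [listFirst]
      rw [found_path_eq_Acore]
      by_cases hne : Acore e en ((lookupExc e n).getD [])[k] (p ++ [((lookupExc e n).getD [])[k]]) = []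
      · simp only [hne, ne_eq, not_true_eq_false, if_false, ite_self]
        exact ih _ (by omega) (k + 1) rfl rest
      · simp [hne]
  · rw [fpLoop.eq_def]
    simp only [hlt, dif_neg, not_false_eq_true]
    rw [List.drop_eq_nil_of_le (by omega)]
    simp

theorem run_eq (e : List (String × List String)) (en : String) :
    ∀ st, (∀ pr ∈ st, pr.2 ≠ []) → fpRun e en st = listFirst e en st := by
  intro st
  induction hn : stackM e st using Nat.strong_induction_on generalizing st with
  | _ n ih =>
  intro hne
  cases st with
  | nil => rw [fpRun.eq_def]; rfl
  | cons pr rest =>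
    obtain ⟨node, p⟩ := pr
    rw [fpRun.eq_def, listFirst]
    by_cases hend : (node == en) = true
    · have hp : p ≠ [] := hne (node, p) (by simp)
      simp [hend, Acore, hp]
    · simp only [hend, if_false]
      have hne' : ∀ pr ∈ (((lookupExc e node).getD []).reverse).foldl (pushNbr p) rest,
          pr.2 ≠ [] := by
        intro pr hpr
        rw [push_foldl_eq] at hpr
        rcases List.mem_append.mp hpr with hin | hin
        · obtain ⟨x, _, rfl⟩ := List.mem_map.mp hin
          simp
        · exact hne pr (by simp [hin])
      have hlt : stackM e ((((lookupExc e node).getD []).reverse).foldl (pushNbr p) rest) < n := by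
        rw [← hn]
        have := stackM_push_lt e node p rest
        simp only [stackM, List.map_cons, List.sum_cons] at this ⊢
        omega
      rw [ih _ hlt _ rfl hne']
      rw [push_foldl_eq]
      have hdrop : (lookupExc e node).getD [] = ((lookupExc e node).getD []).drop 0 := rfl
      rw [hdrop, loop_first]
      unfold Acore
      simp only [hend, if_false]
      cases hv : lookupExc e node with
      | none =>
        rw [fpLoop.eq_def]
        simp [hv]
      | some v => rfl

-- ===== VERDICT (by name: the statement is the Claim_ definition above) =====
theorem found_path_spec : Claim_equal_found_path := by
  intro e s en path _
  unfold Spec_found_path found_path_alt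
  rw [run_eq e en [(s, path ++ [s])] (by simp)]
  rw [listFirst, found_path_eq_Acore]
  by_cases h : Acore e en s (path ++ [s]) = []
  · simp [listFirst, h]
  · simp [h]
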